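-- pv_equiv track=rewrite | github.com/birc-gsa-2022/project-3-python-ms-world-wides | src/sa.py | p_included
-- ===== SOURCE A (Python) =====
-- def p_included(x, p, sa):
--     start, end = 0, len(sa)-1
--     m = len(p)
--
--     suffix = x[sa[end]:sa[end]+m]
--     if suffix == p:
--         return True, end-1, end, end
--
--     while start!=end:
--
--         mid = (start+end)//2
--         suffix = x[sa[mid]:sa[mid]+m]
--
--         if p == suffix:
--             return True, start, mid, end
--         if p < suffix:
--             end = mid
--         else:
--             start = mid+1
--
--     return False, -1, -1, -1
-- ===== SOURCE B (Python) =====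
-- def p_included(x, p, sa):
--     n = len(sa)
--     m = len(p)
--     j = sa[n - 1]
--     if x[j:j + m] == p:
--         return True, n - 2, n - 1, n - 1
--     # stage 1: the probe trajectory, driven only by the order comparison
--     probes = _trajectory(x, p, sa, m, 0, n - 1)
--     # stage 2: first probe whose suffix equals p
--     for s, mid, e in probes:
--         if x[sa[mid]:sa[mid] + m] == p:
--             return True, s, mid, e
--     return False, -1, -1, -1
--
--
-- def _trajectory(x, p, sa, m, s, e):
--     probes = []
--     while s != e:
--         mid = (s + e) // 2
--         probes.append((s, mid, e))
--         if p < x[sa[mid]:sa[mid] + m]: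
--             e = mid
--         else:
--             s = mid + 1
--     return probes
-- ===== Notes on version B (the rewrite author's own statement) =====
-- stated objective: alternative
-- what changed: the single interleaved binary-search loop is split into two staged passes: a first pass builds the full probe trajectory (start, mid, end triples) driven only by the order comparison p < suffix, and a second pass scans that trajectory for the first probe whose suffix equals p
import Mathlib
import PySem

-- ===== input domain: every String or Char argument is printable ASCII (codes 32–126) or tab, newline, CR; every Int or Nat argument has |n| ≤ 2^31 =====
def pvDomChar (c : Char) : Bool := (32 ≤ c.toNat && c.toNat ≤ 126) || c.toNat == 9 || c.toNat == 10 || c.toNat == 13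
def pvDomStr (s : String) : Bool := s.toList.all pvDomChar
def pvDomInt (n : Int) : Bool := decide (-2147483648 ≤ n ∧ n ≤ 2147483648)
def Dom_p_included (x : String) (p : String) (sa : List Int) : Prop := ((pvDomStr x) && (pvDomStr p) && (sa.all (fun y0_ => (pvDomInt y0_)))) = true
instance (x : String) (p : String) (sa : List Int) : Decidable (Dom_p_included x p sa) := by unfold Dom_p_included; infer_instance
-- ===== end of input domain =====

-- B splits A's interleaved binary-search loop into two staged passes: build the probe trajectory, then scan it for the first hit; same results, alternative decomposition (no speed claim).

-- ===== PORT A =====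
-- the while loop of A, as fuel-indexed recursion over the state pair (start, end);
-- the fuel (sa.length at the entry call) exceeds the iteration count, so exhaustion is unreachable
def pvLoopA (x p : List Char) (sa : List Int) (m : Int) : Nat → Int → Int → Bool × Int × Int × Int
  | 0, _, _ => (false, -1, -1, -1)
  | Nat.succ fuel, start, e =>
    if start ≠ e then
      let mid := PySem.Int.floordiv (start + e) 2
      let j := PySem.List.pyGetD sa mid 0   -- sa[mid]; in range whenever 0 ≤ start ≤ e < len sa
      let suffix := PySem.List.slice x (some j) (some (j + m))
      if p = suffix then (true, start, mid, e)
      else if p < suffix then pvLoopA x p sa m fuel start mid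
      else pvLoopA x p sa m fuel (mid + 1) e
    else (false, -1, -1, -1)

def p_included (x : String) (p : String) (sa : List Int) : Bool × Int × Int × Int :=
  let start : Int := 0
  let e : Int := PySem.List.len sa - 1
  let m : Int := PySem.Str.len p
  let j := PySem.List.pyGetD sa e 0   -- sa[end]; IndexError on [] is excluded by Pre_
  let suffix := PySem.List.slice x.toList (some j) (some (j + m))
  if suffix = p.toList then (true, e - 1, e, e)
  else pvLoopA x.toList p.toList sa m sa.length start e

-- ===== PORT B =====
-- stage 1 of B: the probe trajectory of the while loop in _trajectory, as a fuel-indexed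
-- recursion producing the list of (s, mid, e) states; the loop runs at most sa.length times
-- (the interval strictly shrinks), so fuel sa.length at the entry call is never exhausted
def pvProbes (x p : List Char) (sa : List Int) (m : Int) : Nat → Int → Int → List (Int × Int × Int)
  | 0, _, _ => []
  | Nat.succ fuel, s, e =>
    if s = e then []
    else
      let mid := PySem.Int.floordiv (s + e) 2
      let j := PySem.List.pyGetD sa mid 0
      (s, mid, e) ::
        (if p < PySem.List.slice x (some j) (some (j + m)) then pvProbes x p sa m fuel s mid
         else pvProbes x p sa m fuel (mid + 1) e)

-- stage 2 of B: the for loop scanning the trajectory for the first probe whose suffix equals p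
def pvFindHit (x p : List Char) (sa : List Int) (m : Int) : List (Int × Int × Int) → Bool × Int × Int × Int
  | [] => (false, -1, -1, -1)
  | (s, mid, e) :: rest =>
    let j := PySem.List.pyGetD sa mid 0
    if PySem.List.slice x (some j) (some (j + m)) = p then (true, s, mid, e)
    else pvFindHit x p sa m rest

def p_included_alt (x : String) (p : String) (sa : List Int) : Bool × Int × Int × Int :=
  let n : Int := PySem.List.len sa
  let m : Int := PySem.Str.len p
  let j := PySem.List.pyGetD sa (n - 1) 0
  if PySem.List.slice x.toList (some j) (some (j + m)) = p.toList then (true, n - 2, n - 1, n - 1)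
  else pvFindHit x.toList p.toList sa m
    (pvProbes x.toList p.toList sa m sa.length 0 (n - 1))

-- ===== PRECONDITION & SPEC =====
-- Pre_ excludes only sa = [], where Python A raises IndexError on sa[len(sa)-1] (B raises there too)
def Pre_p_included (x : String) (p : String) (sa : List Int) : Prop := sa ≠ []
instance (x : String) (p : String) (sa : List Int) : Decidable (Pre_p_included x p sa) := by unfold Pre_p_included; infer_instance

def pvWitness_p_included : String × String × List Int := ("ba", "a", [1, 0])

def Spec_p_included (x : String) (p : String) (sa : List Int) (out : Bool × Int × Int × Int) : Prop := out = p_included_alt x p sa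
instance (x : String) (p : String) (sa : List Int) (out : Bool × Int × Int × Int) : Decidable (Spec_p_included x p sa out) := by unfold Spec_p_included; infer_instance

-- ===== CLAIM (what is proved, stated in full; the proofs are below) =====
def Claim_equal_p_included : Prop := ∀ (x : String) (p : String) (sa : List Int), Dom_p_included x p sa → Pre_p_included x p sa → Spec_p_included x p sa (p_included x p sa)

-- ===== LEMMAS AND PROOFS =====

-- A's loop equals: scan B's probe trajectory for the first hit (same fuel, any state)
lemma pvLoop_eq_findHit (x p : List Char) (sa : List Int) (m : Int) :
    ∀ fuel s e, pvLoopA x p sa m fuel s e = pvFindHit x p sa m (pvProbes x p sa m fuel s e) := by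
  intro fuel
  induction fuel with
  | zero => intro s e; rfl
  | succ n ih =>
    intro s e
    by_cases hse : s = e
    · simp [pvLoopA, pvProbes, pvFindHit, hse]
    · simp only [pvLoopA, pvProbes, if_neg hse, ne_eq, not_false_eq_true, if_pos]
      by_cases hpe : p = PySem.List.slice x (some (PySem.List.pyGetD sa (PySem.Int.floordiv (s + e) 2) 0))
          (some (PySem.List.pyGetD sa (PySem.Int.floordiv (s + e) 2) 0 + m))
      · simp only [pvFindHit, if_pos hpe, if_pos hpe.symm]
        rw [if_pos hse]
      · simp only [pvFindHit, if_neg hpe]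
        by_cases hlt : p < PySem.List.slice x (some (PySem.List.pyGetD sa (PySem.Int.floordiv (s + e) 2) 0))
            (some (PySem.List.pyGetD sa (PySem.Int.floordiv (s + e) 2) 0 + m))
        · simp only [if_pos hlt, ih]
          rw [if_pos hse, if_neg (fun h => hpe (Eq.symm h))]
        · simp only [if_neg hlt, ih]
          rw [if_pos hse, if_neg (fun h => hpe (Eq.symm h))]

-- ===== VERDICT (by name: the statement is the Claim_ definition above) =====
theorem p_included_spec : Claim_equal_p_included := by
  intro x p sa _ _
  unfold Spec_p_included p_included p_included_alt
  simp only []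
  split_ifs with h
  · rw [show (PySem.List.len sa - 1 - 1 : Int) = PySem.List.len sa - 2 from by ring]
  · exact pvLoop_eq_findHit _ _ _ _ _ _ _
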